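-- pv_equiv track=rewrite | github.com/MilanFIN/tetris-neat | tetris.py | getRoughness
-- ===== SOURCE A (Python) =====
-- def getRoughness(blockMap):
-- 	#find highest points in each column
-- 	heights = [20]*10 #20 is the bottom row coordinate
-- 	for y in range(0,20):
-- 		for x in range (0, 10):
-- 			if ((x, y) in blockMap):
-- 				if (y < heights[x]):
-- 					heights[x] = y
-- 	#count total height difference between columns
-- 	gain = 0
-- 	for i in range(1, 10):
-- 		gain += abs(heights[i] - heights[i-1] )
-- 	return gain
-- ===== SOURCE B (Python) =====
-- def getRoughness(blockMap):
-- 	# single pass over the blocks themselves instead of probing all 200 grid cells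
-- 	heights = [20]*10
-- 	for (x, y) in blockMap:
-- 		if 0 <= x < 10 and 0 <= y < 20:
-- 			heights[x] = min(heights[x], y)
-- 	gain = 0
-- 	for i in range(1, 10):
-- 		gain += abs(heights[i] - heights[i-1])
-- 	return gain
-- ===== Notes on version B (the rewrite author's own statement) =====
-- stated objective: alternative
-- what changed: Replaces the 20x10 nested grid scan that tests every cell for membership in blockMap by a single pass over the block list itself, taking per-column minima of the in-range blocks; the gain loop is unchanged.
import Mathlib
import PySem

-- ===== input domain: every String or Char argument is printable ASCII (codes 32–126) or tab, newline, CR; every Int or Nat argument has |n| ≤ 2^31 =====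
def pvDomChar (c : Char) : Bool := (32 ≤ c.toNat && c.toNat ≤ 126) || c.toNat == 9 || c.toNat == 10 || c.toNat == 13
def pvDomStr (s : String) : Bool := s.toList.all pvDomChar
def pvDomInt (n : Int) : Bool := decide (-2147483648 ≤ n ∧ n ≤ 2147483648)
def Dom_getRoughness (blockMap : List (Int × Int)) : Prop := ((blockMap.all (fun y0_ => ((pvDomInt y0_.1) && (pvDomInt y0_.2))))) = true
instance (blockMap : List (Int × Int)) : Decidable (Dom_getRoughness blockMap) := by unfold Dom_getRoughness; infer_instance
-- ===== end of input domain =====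

-- B replaces A's 20×10 grid scan (a membership test per cell) by one pass over the block list
-- itself, taking per-column minima of the in-range blocks; same adjacent-difference gain loop.

-- ===== PORT A =====
-- inner loop body of A: 'if (x, y) in blockMap: if y < heights[x]: heights[x] = y'
-- (indices are always 0 ≤ x < 10 = len(heights), so the total pyGetD/pySetD forms are exact here)
def pvStepA (blockMap : List (Int × Int)) (y : Int) (hs : List Int) (x : Int) : List Int :=
  if (x, y) ∈ blockMap then
    if y < PySem.List.pyGetD hs x 0 then PySem.List.pySetD hs x y else hs
  else hs

-- the two nested 'for' loops building 'heights'
def pvHeightsA (blockMap : List (Int × Int)) : List Int :=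
  (PySem.List.pyRange 0 20 1).foldl
    (fun hs y => (PySem.List.pyRange 0 10 1).foldl (pvStepA blockMap y) hs)
    (List.replicate 10 20)

def getRoughness (blockMap : List (Int × Int)) : Int :=
  let heights := pvHeightsA blockMap
  (PySem.List.pyRange 1 10 1).foldl
    (fun g i => g + |PySem.List.pyGetD heights i 0 - PySem.List.pyGetD heights (i - 1) 0|) 0

-- ===== PORT B =====
-- loop body of B: 'if 0 <= x < 10 and 0 <= y < 20: heights[x] = min(heights[x], y)'
def pvStepB (hs : List Int) (p : Int × Int) : List Int :=
  if 0 ≤ p.1 ∧ p.1 < 10 ∧ 0 ≤ p.2 ∧ p.2 < 20 then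
    PySem.List.pySetD hs p.1 (min (PySem.List.pyGetD hs p.1 0) p.2)
  else hs

-- B's single pass over the block list building 'heights'
def pvHeightsB (blockMap : List (Int × Int)) : List Int :=
  blockMap.foldl pvStepB (List.replicate 10 20)

def getRoughness_alt (blockMap : List (Int × Int)) : Int :=
  let heights := pvHeightsB blockMap
  (PySem.List.pyRange 1 10 1).foldl
    (fun g i => g + |PySem.List.pyGetD heights i 0 - PySem.List.pyGetD heights (i - 1) 0|) 0

-- ===== PRECONDITION & SPEC =====
def Spec_getRoughness (blockMap : List (Int × Int)) (out : Int) : Prop := out = getRoughness_alt blockMap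
instance (blockMap : List (Int × Int)) (out : Int) : Decidable (Spec_getRoughness blockMap out) := by unfold Spec_getRoughness; infer_instance

-- ===== CLAIM (what is proved, stated in full; the proofs are below) =====
def Claim_equal_getRoughness : Prop := ∀ (blockMap : List (Int × Int)), Dom_getRoughness blockMap → Spec_getRoughness blockMap (getRoughness blockMap)

-- ===== LEMMAS AND PROOFS =====

-- min-fold depends only on membership
theorem pv_foldl_min_congr (a : Int) (l1 l2 : List Int) (h : ∀ z, z ∈ l1 ↔ z ∈ l2) :
    l1.foldl min a = l2.foldl min a := by
  apply le_antisymm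
  · rcases PySem.List.foldl_min_mem l2 a with h2 | h2
    · rw [h2]; exact (PySem.List.foldl_min_le l1 a).1
    · exact (PySem.List.foldl_min_le l1 a).2 _ ((h _).mpr h2)
  · rcases PySem.List.foldl_min_mem l1 a with h1 | h1
    · rw [h1]; exact (PySem.List.foldl_min_le l2 a).1
    · exact (PySem.List.foldl_min_le l2 a).2 _ ((h _).mp h1)

-- conditional min-fold = min-fold over the filtered list
theorem pv_foldl_if_min (p : Int → Bool) (l : List Int) (a : Int) :
    l.foldl (fun h y => if p y then min h y else h) a = (l.filter p).foldl min a := by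
  induction l generalizing a with
  | nil => rfl
  | cons y t ih => by_cases hp : p y <;> simp [List.filter, hp, ih]

theorem pv_len_stepA (bm : List (Int × Int)) (y : Int) (hs : List Int) (x : Int) :
    (pvStepA bm y hs x).length = hs.length := by
  unfold pvStepA; split_ifs <;> simp [PySem.List.length_pySetD]

theorem pv_len_foldA (bm : List (Int × Int)) (y : Int) (xs : List Int) (hs : List Int) :
    (xs.foldl (pvStepA bm y) hs).length = hs.length := by
  induction xs generalizing hs with
  | nil => rfl
  | cons x t ih => simp [List.foldl, ih, pv_len_stepA]

theorem pv_len_stepB (hs : List Int) (p : Int × Int) : (pvStepB hs p).length = hs.length := by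
  unfold pvStepB; split_ifs <;> simp [PySem.List.length_pySetD]

theorem pv_len_foldB (bs : List (Int × Int)) (hs : List Int) :
    (bs.foldl pvStepB hs).length = hs.length := by
  induction bs generalizing hs with
  | nil => rfl
  | cons b t ih => simp [List.foldl, ih, pv_len_stepB]

-- pointwise effect of one A-step
theorem pv_getD_stepA (bm : List (Int × Int)) (y x i : Int) (hs : List Int)
    (hx : 0 ≤ x) (hi0 : 0 ≤ i) (hil : i < hs.length) :
    PySem.List.pyGetD (pvStepA bm y hs x) i 0 =
      if x = i ∧ (i, y) ∈ bm ∧ y < PySem.List.pyGetD hs i 0 then y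
      else PySem.List.pyGetD hs i 0 := by
  unfold pvStepA
  by_cases hxi : x = i
  · subst hxi
    by_cases hmem : (x, y) ∈ bm
    · by_cases hlt : y < PySem.List.pyGetD hs x 0
      · rw [if_pos hmem, if_pos hlt, if_pos ⟨rfl, hmem, hlt⟩,
          PySem.List.pySetD_of_nonneg hs y hx, PySem.List.pyGetD_of_nonneg _ _ hx]
        simp [List.getD, show x.toNat < hs.length by omega]
      · simp [hmem, hlt]
    · simp [hmem]
  · have hno : ¬(x = i ∧ (i, y) ∈ bm ∧ y < PySem.List.pyGetD hs i 0) := fun h => hxi h.1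
    rw [if_neg hno]
    by_cases hmem : (x, y) ∈ bm
    · by_cases hlt : y < PySem.List.pyGetD hs x 0
      · rw [if_pos hmem, if_pos hlt, PySem.List.pySetD_of_nonneg hs y hx,
          PySem.List.pyGetD_of_nonneg _ _ hi0, PySem.List.pyGetD_of_nonneg _ _ hi0]
        have hne : i.toNat ≠ x.toNat := by omega
        simp [List.getD, hne.symm]
      · rw [if_pos hmem, if_neg hlt]
    · rw [if_neg hmem]

-- pointwise effect of the inner x-fold of A
theorem pv_getD_foldA_inner (bm : List (Int × Int)) (y i : Int) (xs : List Int)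
    (hi0 : 0 ≤ i) :
    ∀ hs : List Int, (∀ x ∈ xs, 0 ≤ x) → i < hs.length →
    PySem.List.pyGetD (xs.foldl (pvStepA bm y) hs) i 0 =
      xs.foldl (fun h x => if x = i ∧ (i, y) ∈ bm ∧ y < h then y else h)
        (PySem.List.pyGetD hs i 0) := by
  induction xs with
  | nil => intro hs _ _; rfl
  | cons x t ih =>
    intro hs hxs hil
    simp only [List.foldl]
    rw [ih _ (fun z hz => hxs z (List.mem_cons_of_mem _ hz))
        (by rw [pv_len_stepA]; exact hil),
      pv_getD_stepA bm y x i hs (hxs x List.mem_cons_self) hi0 hil]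

-- collapsing the one-hot scalar fold over range(0,10)
theorem pv_fold_onehot (i : Int) (hi0 : 0 ≤ i) (hi : i < 10) (f : Int → Int → Int) (a : Int) :
    (PySem.List.pyRange 0 10 1).foldl (fun h x => if x = i then f h x else h) a = f a i := by
  have hr : PySem.List.pyRange 0 10 1 = [0,1,2,3,4,5,6,7,8,9] := by decide
  rw [hr]
  interval_cases i <;> simp

-- pointwise value of A's heights list
theorem pv_heightsA_getD (bm : List (Int × Int)) (i : Int) (ys : List Int)
    (hi0 : 0 ≤ i) (hi : i < 10) :
    ∀ hs : List Int, hs.length = 10 →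
    PySem.List.pyGetD
      (ys.foldl (fun hs y => (PySem.List.pyRange 0 10 1).foldl (pvStepA bm y) hs) hs) i 0 =
      ys.foldl (fun h y => if (i, y) ∈ bm ∧ y < h then y else h)
        (PySem.List.pyGetD hs i 0) := by
  induction ys with
  | nil => intro hs _; rfl
  | cons y t ih =>
    intro hs hlen
    simp only [List.foldl]
    rw [ih _ (by rw [pv_len_foldA]; exact hlen),
      pv_getD_foldA_inner bm y i _ hi0 hs
        (by intro x hx; rw [PySem.List.mem_pyRange_one] at hx; omega) (by omega)]
    congr 1
    have he : (fun (h : Int) (x : Int) => if x = i ∧ (i, y) ∈ bm ∧ y < h then y else h)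
        = fun h x => if x = i then (if (i, y) ∈ bm ∧ y < h then y else h) else h := by
      funext h x
      by_cases hxi : x = i <;> simp [hxi]
    rw [he, pv_fold_onehot i hi0 hi (fun h _ => if (i, y) ∈ bm ∧ y < h then y else h)]

-- pointwise effect of one B-step
theorem pv_getD_stepB (p : Int × Int) (i : Int) (hs : List Int)
    (hi0 : 0 ≤ i) (hi : i < 10) (hlen : hs.length = 10) :
    PySem.List.pyGetD (pvStepB hs p) i 0 =
      if p.1 = i ∧ 0 ≤ p.2 ∧ p.2 < 20 then min (PySem.List.pyGetD hs i 0) p.2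
      else PySem.List.pyGetD hs i 0 := by
  unfold pvStepB
  by_cases hc : 0 ≤ p.1 ∧ p.1 < 10 ∧ 0 ≤ p.2 ∧ p.2 < 20
  · rw [if_pos hc, PySem.List.pySetD_of_nonneg hs _ hc.1,
      PySem.List.pyGetD_of_nonneg _ _ hi0, PySem.List.pyGetD_of_nonneg _ _ hc.1,
      PySem.List.pyGetD_of_nonneg _ _ hi0]
    by_cases hpi : p.1 = i
    · subst hpi
      simp [hc.2.2, List.getD, show p.1.toNat < hs.length by omega]
    · have hne : i.toNat ≠ p.1.toNat := by omega
      simp [hpi, hc.2.2, List.getD, hne.symm]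
  · rw [if_neg hc, if_neg]
    rintro ⟨h1, h2, h3⟩
    exact hc ⟨by omega, by omega, h2, h3⟩

-- pointwise value of B's heights list
theorem pv_heightsB_getD (bs : List (Int × Int)) (i : Int)
    (hi0 : 0 ≤ i) (hi : i < 10) :
    ∀ hs : List Int, hs.length = 10 →
    PySem.List.pyGetD (bs.foldl pvStepB hs) i 0 =
      bs.foldl (fun h p => if p.1 = i ∧ 0 ≤ p.2 ∧ p.2 < 20 then min h p.2 else h)
        (PySem.List.pyGetD hs i 0) := by
  induction bs with
  | nil => intro hs _; rfl
  | cons b t ih =>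
    intro hs hlen
    simp only [List.foldl]
    rw [ih _ (by rw [pv_len_stepB]; exact hlen), pv_getD_stepB b i hs hi0 hi hlen]

-- the A scalar step is a conditional min
theorem pv_stepA_min (bm : List (Int × Int)) (i : Int) (l : List Int) (a : Int) :
    l.foldl (fun h y => if (i, y) ∈ bm ∧ y < h then y else h) a =
      l.foldl (fun h y => if ((i, y) ∈ bm : Bool) then min h y else h) a := by
  apply PySem.List.foldl_congr_mem
  intro h y _
  by_cases hm : (i, y) ∈ bm
  · by_cases hlt : y < h <;> simp [hm, hlt] <;> omega
  · simp [hm]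

-- the B scalar fold as a min-fold over a filterMap
theorem pv_stepB_filterMap (bs : List (Int × Int)) (i : Int) (a : Int) :
    bs.foldl (fun h p => if p.1 = i ∧ 0 ≤ p.2 ∧ p.2 < 20 then min h p.2 else h) a =
      (bs.filterMap (fun p => if p.1 = i ∧ 0 ≤ p.2 ∧ p.2 < 20 then some p.2 else none)).foldl
        min a := by
  induction bs generalizing a with
  | nil => rfl
  | cons b t ih =>
    by_cases hc : b.1 = i ∧ 0 ≤ b.2 ∧ b.2 < 20 <;> simp [hc, ih]

-- both per-column values coincide
theorem pv_col_eq (bm : List (Int × Int)) (i : Int) (hi0 : 0 ≤ i) (hi : i < 10) :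
    (PySem.List.pyRange 0 20 1).foldl (fun h y => if (i, y) ∈ bm ∧ y < h then y else h) 20 =
      bm.foldl (fun h p => if p.1 = i ∧ 0 ≤ p.2 ∧ p.2 < 20 then min h p.2 else h) 20 := by
  rw [pv_stepA_min, pv_stepB_filterMap,
    pv_foldl_if_min (fun y => ((i, y) ∈ bm : Bool)) (PySem.List.pyRange 0 20 1) 20]
  apply pv_foldl_min_congr
  intro z
  simp only [List.mem_filter, PySem.List.mem_pyRange_one, List.mem_filterMap,
    decide_eq_true_eq]
  constructor
  · rintro ⟨⟨h0, h20⟩, hm⟩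
    exact ⟨(i, z), hm, by simp [h0, h20]⟩
  · rintro ⟨⟨x, y⟩, hmem, hf⟩
    by_cases hc : x = i ∧ 0 ≤ y ∧ y < 20
    · rw [if_pos hc] at hf
      obtain ⟨rfl, h0, h20⟩ := hc
      obtain rfl : y = z := by simpa using hf
      exact ⟨⟨h0, h20⟩, hmem⟩
    · rw [if_neg hc] at hf; cases hf

-- the two heights lists are equal
theorem pv_heights_eq (bm : List (Int × Int)) : pvHeightsA bm = pvHeightsB bm := by
  have hlenA : (pvHeightsA bm).length = 10 := by
    unfold pvHeightsA
    have h : ∀ ys : List Int, ∀ hs : List Int,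
        ((ys.foldl (fun hs y => (PySem.List.pyRange 0 10 1).foldl (pvStepA bm y) hs) hs)).length
        = hs.length := by
      intro ys
      induction ys with
      | nil => intro hs; rfl
      | cons y t ih => intro hs; simp [List.foldl, ih, pv_len_foldA]
    rw [h]; simp
  have hlenB : (pvHeightsB bm).length = 10 := by
    unfold pvHeightsB; rw [pv_len_foldB]; simp
  apply List.ext_getElem (by omega)
  intro n hn1 hn2
  have hn : n < 10 := by omega
  have e1 : PySem.List.pyGetD (pvHeightsA bm) (n : Int) 0 = (pvHeightsA bm)[n] := by
    rw [PySem.List.pyGetD_of_nonneg _ _ (by positivity)]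
    simp [List.getD, List.getElem?_eq_getElem hn1]
  have e2 : PySem.List.pyGetD (pvHeightsB bm) (n : Int) 0 = (pvHeightsB bm)[n] := by
    rw [PySem.List.pyGetD_of_nonneg _ _ (by positivity)]
    simp [List.getD, List.getElem?_eq_getElem hn2]
  rw [← e1, ← e2]
  unfold pvHeightsA pvHeightsB
  rw [pv_heightsA_getD bm n _ (by positivity) (by exact_mod_cast hn) _ (by simp),
    pv_heightsB_getD bm n (by positivity) (by exact_mod_cast hn) _ (by simp)]
  have h20 : PySem.List.pyGetD (List.replicate 10 (20 : Int)) (n : Int) 0 = 20 := by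
    rw [PySem.List.pyGetD_of_nonneg _ _ (by positivity)]
    have ht : ((n : Int)).toNat = n := by omega
    rw [ht, List.getD_eq_getElem _ _ (by simpa using hn), List.getElem_replicate]
  rw [h20]
  exact pv_col_eq bm n (by positivity) (by exact_mod_cast hn)

-- ===== VERDICT (by name: the statement is the Claim_ definition above) =====
theorem getRoughness_spec : Claim_equal_getRoughness := by
  intro bm _
  unfold Spec_getRoughness getRoughness getRoughness_alt
  rw [pv_heights_eq bm]
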